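-- pv_equiv track=rewrite | github.com/Dlopriore/EECE2140 | DanteLoPrioreEECE2140/HomeworkProblems2/HW2Prob8LoPriore.py | sorting_integer_list
-- ===== SOURCE A (Python) =====
-- def sorting_integer_list(input_integer_list):
--     freq_dict = dict()
--     sorted_freq_dict = dict()
--
--     # sorting dictionary frequencies requirement
--     for cur_num in input_integer_list:
--         if cur_num in freq_dict:
--             freq_dict[cur_num] +=1
--         else:
--             freq_dict[cur_num] = 1
--         sorted_freq_dict = dict(sorted(freq_dict.items()))
--
--     sort_freq_list = list()
--
--     # sorting dictionary frequencies requirement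
--     for cur_index in range(len(input_integer_list)):
--         if input_integer_list[cur_index] not in sort_freq_list:
--            sort_freq_list.append(input_integer_list[cur_index])
--
--     sort_freq_list.sort(reverse=True)
--
--     return sort_freq_list, sorted_freq_dict
-- ===== SOURCE B (Python) =====
-- def sorting_integer_list(input_integer_list):
--     # Sort once, then group maximal runs of equal values in a single linear scan:
--     # each run yields one distinct value (ascending) and its frequency.
--     asc = sorted(input_integer_list)
--     n = len(asc)
--     uniq = []
--     freq = {}
--     i = 0
--     while i < n:
--         v = asc[i]
--         j = i + 1
--         while j < n and asc[j] == v: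
--             j += 1
--         uniq.append(v)
--         freq[v] = j - i
--         i = j
--     return list(reversed(uniq)), freq
-- ===== Notes on version B (the rewrite author's own statement) =====
-- stated objective: faster
-- what changed: Replaces the hash-count loop that re-sorts the whole dict on every element plus a quadratic membership-scan dedup pass by a single sort followed by one linear run-grouping scan that yields the distinct values and their frequencies at once.
import Mathlib
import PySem

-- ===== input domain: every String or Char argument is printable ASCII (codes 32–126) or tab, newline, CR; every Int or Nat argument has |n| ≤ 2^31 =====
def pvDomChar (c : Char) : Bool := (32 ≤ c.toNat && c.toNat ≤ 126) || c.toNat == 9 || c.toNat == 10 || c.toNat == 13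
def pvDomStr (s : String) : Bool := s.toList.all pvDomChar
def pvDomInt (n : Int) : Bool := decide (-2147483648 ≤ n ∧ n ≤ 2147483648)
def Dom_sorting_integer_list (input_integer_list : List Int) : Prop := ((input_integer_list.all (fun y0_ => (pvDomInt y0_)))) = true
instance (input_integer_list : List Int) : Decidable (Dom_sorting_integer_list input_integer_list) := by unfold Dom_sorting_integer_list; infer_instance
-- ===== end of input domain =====

-- B replaces A's per-element dict re-sorting and quadratic dedup scan by one sort plus a
-- single run-grouping scan (objective: faster).

-- ===== PORT A =====
-- The first 'for' loop carries (freq_dict, sorted_freq_dict); 'sorted(freq_dict.items())'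
-- sorts (key, value) tuples, ported exactly with sorted2.
def sorting_integer_list (input_integer_list : List Int) : List Int × (List (Int × Int)) :=
  let st := input_integer_list.foldl
    (fun (st : PySem.Dict Int Int × PySem.Dict Int Int) cur_num =>
      let fd := if st.1.contains cur_num
        then st.1.insert cur_num (st.1.getD cur_num 0 + 1)
        else st.1.insert cur_num 1
      (fd, PySem.Dict.ofList (PySem.List.sorted2 fd.items Prod.fst Prod.snd)))
    (PySem.Dict.empty, PySem.Dict.empty)
  let sort_freq_list := (PySem.List.pyRange 0 (PySem.List.len input_integer_list)).foldl
    (fun acc cur_index =>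
      if acc.contains (PySem.List.pyGetD input_integer_list cur_index 0)
      then acc
      else acc ++ [PySem.List.pyGetD input_integer_list cur_index 0]) ([] : List Int)
  (PySem.List.sorted sort_freq_list (fun x => x) true, st.2.items)

-- ===== PORT B =====
-- Source B's outer 'while i < n' is transcribed as recursion on the remaining suffix of the
-- sorted copy; the inner 'while' counting a run of equal values is takeWhile/dropWhile.
def pvGroupRuns : List Int → List Int × List (Int × Int)
  | [] => ([], [])
  | v :: rest =>
    let run := rest.takeWhile (fun y => y == v)
    let tail := rest.dropWhile (fun y => y == v)
    let p := pvGroupRuns tail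
    (v :: p.1, (v, (1 + run.length : Int)) :: p.2)
termination_by l => l.length
decreasing_by
  simpa using Nat.lt_succ_of_le (List.length_dropWhile_le (fun y => y == v) rest)

def sorting_integer_list_alt (input_integer_list : List Int) : List Int × (List (Int × Int)) :=
  let asc := PySem.List.sorted input_integer_list (fun x => x)
  let p := pvGroupRuns asc
  (p.1.reverse, p.2)

-- ===== PRECONDITION & SPEC =====
def Spec_sorting_integer_list (input_integer_list : List Int) (out : List Int × (List (Int × Int))) : Prop := out = sorting_integer_list_alt input_integer_list
instance (input_integer_list : List Int) (out : List Int × (List (Int × Int))) : Decidable (Spec_sorting_integer_list input_integer_list out) := by unfold Spec_sorting_integer_list; infer_instance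

-- ===== CLAIM (what is proved, stated in full; the proofs are below) =====
def Claim_equal_sorting_integer_list : Prop := ∀ (input_integer_list : List Int), Dom_sorting_integer_list input_integer_list → Spec_sorting_integer_list input_integer_list (sorting_integer_list input_integer_list)

-- ===== LEMMAS AND PROOFS =====

-- the strict lexicographic comparison sorted2 uses with keys fst, snd
def pvLex (a b : Int × Int) : Bool :=
  decide (a.1 < b.1) || (!decide (b.1 < a.1) && decide (a.2 < b.2))

theorem pvLex_false_iff (a b : Int × Int) :
    pvLex a b = false ↔ (b.1 < a.1 ∨ (b.1 = a.1 ∧ b.2 ≤ a.2)) := by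
  simp [pvLex]; omega

theorem sorted2_eq_foldl (xs : List (Int × Int)) :
    PySem.List.sorted2 xs Prod.fst Prod.snd =
      xs.foldl (fun acc x => PySem.List.insertBy pvLex x acc) [] := rfl

theorem pairwise_insertBy (x : Int × Int) (l : List (Int × Int))
    (h : l.Pairwise (fun a b => pvLex b a = false)) :
    (PySem.List.insertBy pvLex x l).Pairwise (fun a b => pvLex b a = false) := by
  induction l with
  | nil => simp [PySem.List.insertBy]
  | cons y ys ih =>
    rw [List.pairwise_cons] at h
    by_cases hxy : pvLex x y = true
    · simp only [PySem.List.insertBy, hxy, if_pos]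
      refine List.Pairwise.cons ?_ (List.Pairwise.cons h.1 h.2)
      intro z hz
      rcases List.mem_cons.mp hz with rfl | hz
      · rw [pvLex_false_iff]; simp [pvLex] at hxy; omega
      · have hzy := h.1 z hz
        rw [pvLex_false_iff] at hzy ⊢
        simp [pvLex] at hxy
        omega
    · rw [Bool.not_eq_true] at hxy
      simp only [PySem.List.insertBy, hxy]
      refine List.Pairwise.cons ?_ (ih h.2)
      intro z hz
      rcases (PySem.List.mem_insertBy pvLex x z ys).mp hz with rfl | hz
      · exact hxy
      · exact h.1 z hz

theorem pairwise_sorted2 (xs : List (Int × Int)) :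
    (PySem.List.sorted2 xs Prod.fst Prod.snd).Pairwise (fun a b => pvLex b a = false) := by
  rw [sorted2_eq_foldl]
  have H : ∀ (l : List (Int × Int)) (acc : List (Int × Int)),
      acc.Pairwise (fun a b => pvLex b a = false) →
      (l.foldl (fun acc x => PySem.List.insertBy pvLex x acc) acc).Pairwise
        (fun a b => pvLex b a = false) := by
    intro l
    induction l with
    | nil => intro acc h; simpa using h
    | cons x t ih => intro acc h; exact ih _ (pairwise_insertBy x acc h)
  exact H xs [] (by simp)

-- any strictly fst-increasing rearrangement of xs is sorted2 xs fst snd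
theorem sorted2_eq_of_perm_of_pairwise_lt (xs ys : List (Int × Int))
    (hperm : ys.Perm xs) (hp : ys.Pairwise (fun a b => a.1 < b.1)) :
    PySem.List.sorted2 xs Prod.fst Prod.snd = ys := by
  refine List.Perm.eq_of_pairwise ?_ (pairwise_sorted2 xs)
    (hp.imp ?_) ((PySem.List.sorted2_perm xs Prod.fst Prod.snd false).trans hperm.symm)
  · intro a b _ _ hab hba
    rw [pvLex_false_iff] at hab hba
    have : a.1 = b.1 ∧ a.2 = b.2 := by omega
    exact Prod.ext this.1 this.2
  · intro a b h; rw [pvLex_false_iff]; omega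

-- ===== the run-grouping scan on a ≤-sorted list =====
theorem pvGroupRuns_spec (l : List Int) (h : l.Pairwise (· ≤ ·)) :
    (pvGroupRuns l).1.Pairwise (· < ·) ∧
    (∀ x, x ∈ (pvGroupRuns l).1 ↔ x ∈ l) ∧
    (pvGroupRuns l).2 = (pvGroupRuns l).1.map (fun v => (v, (l.count v : Int))) := by
  induction l using pvGroupRuns.induct with
  | case1 => simp [pvGroupRuns]
  | case2 v rest tail ih =>
    set run := rest.takeWhile (fun y => y == v) with hrundef
    rw [List.pairwise_cons] at h
    -- tail is a suffix of rest, hence still sorted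
    have htail : tail.Pairwise (· ≤ ·) :=
      h.2.sublist (List.dropWhile_sublist (fun y => y == v))
    have ihs := ih htail
    -- every element of run equals v
    have hrun : ∀ y ∈ run, y = v := by
      intro y hy
      have h2 : (y == v) = true := List.mem_takeWhile_imp (l := rest) (p := fun y => y == v) hy
      exact eq_of_beq h2
    -- every element of tail is > v
    have htgt : ∀ z ∈ tail, v < z := by
      intro z hz
      cases htl : tail with
      | nil => rw [htl] at hz; simp at hz
      | cons w ws =>
        have hw : ¬ (w == v) = true := by
          have := List.head?_dropWhile_not (p := fun y => y == v) (l := rest)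
          rw [show rest.dropWhile (fun y => y == v) = tail from rfl, htl] at this
          simpa using this
        have hwne : w ≠ v := by simpa using hw
        have hwmem : w ∈ rest := (List.dropWhile_sublist _).mem (htl ▸ List.mem_cons_self)
        have hvw : v < w := lt_of_le_of_ne (h.1 w hwmem) (Ne.symm hwne)
        rw [htl] at hz
        rcases List.mem_cons.mp hz with rfl | hz
        · exact hvw
        · rw [htl] at htail
          exact lt_of_lt_of_le hvw ((List.pairwise_cons.mp htail).1 z hz)
    have hrt : rest = run ++ tail := (List.takeWhile_append_dropWhile).symm
    have hmem1 : ∀ x, x ∈ (pvGroupRuns tail).1 ↔ x ∈ tail := ihs.2.1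
    refine ⟨?_, ?_, ?_⟩
    · simp only [pvGroupRuns]
      refine List.Pairwise.cons ?_ ihs.1
      intro z hz
      exact htgt z ((hmem1 z).mp hz)
    · intro x
      simp only [pvGroupRuns, List.mem_cons]
      rw [show List.dropWhile (fun y => y == v) rest = tail from rfl, hmem1 x]
      constructor
      · rintro (rfl | hx)
        · exact Or.inl rfl
        · exact Or.inr (hrt ▸ List.mem_append_right run hx)
      · rintro (rfl | hx)
        · exact Or.inl rfl
        · rw [hrt] at hx
          rcases List.mem_append.mp hx with hx | hx
          · exact Or.inl (hrun x hx)
          · exact Or.inr hx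
    · have hvnot : v ∉ tail := fun hv => lt_irrefl v (htgt v hv)
      have hcv : ((v :: rest).count v : Int) = 1 + run.length := by
        rw [hrt]
        have h1 : run.count v = run.length := by
          rw [List.count_eq_length]; intro y hy; exact ((hrun y hy) ▸ rfl)
        have h2 : tail.count v = 0 := List.count_eq_zero.mpr hvnot
        simp [List.count_append, h1, h2]
        omega
      simp only [pvGroupRuns, List.map_cons]
      refine List.cons_eq_cons.mpr ⟨by rw [hcv], ?_⟩
      rw [ihs.2.2]
      refine List.map_congr_left ?_
      intro w hw
      have hwt : w ∈ tail := (hmem1 w).mp hw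
      have hwv : w ≠ v := fun hwv => lt_irrefl v (hwv ▸ htgt w hwt)
      have : (v :: rest).count w = tail.count w := by
        rw [hrt]
        have h1 : run.count w = 0 := by
          rw [List.count_eq_zero]; intro hwr; exact hwv (hrun w hwr)
        simp [List.count_append, h1, Ne.symm hwv]
      rw [this]

-- A's second loop builds set(xs) in first-occurrence order
theorem sort_freq_list_eq (xs : List Int) :
    (PySem.List.pyRange 0 (PySem.List.len xs)).foldl
      (fun acc cur_index =>
        if acc.contains (PySem.List.pyGetD xs cur_index 0)
        then acc
        else acc ++ [PySem.List.pyGetD xs cur_index 0]) ([] : List Int)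
    = PySem.Set.ofList xs := by
  rw [show PySem.List.len xs = ((xs.length : Int)) from rfl,
    PySem.List.foldl_pyRange_zero_pyGetD' xs 0
      (fun acc x => if acc.contains x then acc else acc ++ [x]) [],
    PySem.Set.ofList_eq_foldl]
  rfl

-- the paired fold of A's first loop: first component, and second component (nonempty list)
theorem pairfold_snd {D E : Type} (g : D → Int → D) (h : D → E) (l : List Int) (d : D) (e : E)
    (hne : l ≠ []) :
    (l.foldl (fun st x => ((g st.1 x), h (g st.1 x))) (d, e)).2 = h (l.foldl g d) := by
  induction l generalizing d e with
  | nil => exact absurd rfl hne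
  | cons x t ih =>
    cases t with
    | nil => rfl
    | cons y u => exact ih (g d x) (h (g d x)) (by simp)

-- A's step function, with the if collapsed
theorem step_collapse (st : PySem.Dict Int Int × PySem.Dict Int Int) (cur_num : Int) :
    ((let fd := if st.1.contains cur_num
        then st.1.insert cur_num (st.1.getD cur_num 0 + 1)
        else st.1.insert cur_num 1;
      (fd, PySem.Dict.ofList (PySem.List.sorted2 fd.items Prod.fst Prod.snd)))
      : PySem.Dict Int Int × PySem.Dict Int Int)
    = (let fd := st.1.insert cur_num (st.1.getD cur_num 0 + 1);
      (fd, PySem.Dict.ofList (PySem.List.sorted2 fd.items Prod.fst Prod.snd))) := by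
  by_cases hc : st.1.contains cur_num = true
  · simp [hc]
  · rw [Bool.not_eq_true] at hc
    simp [hc, PySem.Dict.getD_of_not_contains _ _ hc]

-- ===== VERDICT (by name: the statement is the Claim_ definition above) =====
theorem sorting_integer_list_spec : Claim_equal_sorting_integer_list := by
  intro xs _
  unfold Spec_sorting_integer_list
  rcases eq_or_ne xs [] with rfl | hne
  · simp [sorting_integer_list, sorting_integer_list_alt, pvGroupRuns,
      PySem.List.sorted, PySem.List.pyRange, PySem.List.len, PySem.Dict.empty]
  · unfold sorting_integer_list sorting_integer_list_alt
    simp only []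
    have hasc : (PySem.List.sorted xs (fun x => x)).Pairwise (· ≤ ·) :=
      PySem.List.sorted_pairwise xs (fun x => x)
    obtain ⟨hU, hUmem, hUmap⟩ := pvGroupRuns_spec _ hasc
    set asc := PySem.List.sorted xs (fun x => x) with hascdef
    set U := (pvGroupRuns asc).1 with hUdef
    have hUmemx : ∀ x, x ∈ U ↔ x ∈ xs := by
      intro x; rw [hUmem x, PySem.List.mem_sorted]
    have hUnodup : U.Nodup := hU.imp (fun h => ne_of_lt h)
    have hUperm : U.Perm (PySem.Set.ofList xs) :=
      (List.perm_ext_iff_of_nodup hUnodup (PySem.Set.nodup_ofList xs)).mpr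
        (fun x => (hUmemx x).trans (PySem.Set.mem_ofList xs x).symm)
    -- first components
    have hfst : PySem.List.sorted (PySem.Set.ofList xs) (fun x => x) true = U.reverse := by
      refine PySem.List.sorted_rev_eq_of_perm_of_pairwise_gt _ _ _ ?_ ?_
      · exact (List.reverse_perm U).trans hUperm
      · rw [List.pairwise_reverse]; exact hU
    -- second components
    have hcnt : ∀ v, asc.count v = xs.count v := by
      intro v; exact (PySem.List.sorted_perm xs (fun x => x) false).count_eq v
    have hmapeq : U.map (fun v => (v, (asc.count v : Int)))
        = U.map (fun v => (v, (xs.count v : Int))) := by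
      refine List.map_congr_left (fun w _ => ?_); rw [hcnt w]
    have hsnd2 : PySem.List.sorted2 (PySem.Dict.counter xs).items Prod.fst Prod.snd
        = U.map (fun v => (v, (xs.count v : Int))) := by
      refine sorted2_eq_of_perm_of_pairwise_lt _ _ ?_ ?_
      · rw [PySem.Dict.items_counter xs]
        exact hUperm.map _
      · exact List.pairwise_map.mpr (hU.imp (fun h => h))
    have hitems : (PySem.Dict.ofList (U.map (fun v => (v, (xs.count v : Int))))).items
        = U.map (fun v => (v, (xs.count v : Int))) := by
      unfold PySem.Dict.ofList PySem.Dict.update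
      have := PySem.Dict.items_foldl_insert_fresh (U.map (fun v => (v, (xs.count v : Int))))
        Prod.fst Prod.snd PySem.Dict.empty
        (fun a _ => by simp [PySem.Dict.contains_empty])
        (by rw [List.map_map]; simpa [Function.comp_def] using hUnodup)
      simpa using this
    -- assemble
    have hfold1 : xs.foldl
        (fun (st : PySem.Dict Int Int × PySem.Dict Int Int) cur_num =>
          let fd := if st.1.contains cur_num
            then st.1.insert cur_num (st.1.getD cur_num 0 + 1)
            else st.1.insert cur_num 1
          (fd, PySem.Dict.ofList (PySem.List.sorted2 fd.items Prod.fst Prod.snd)))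
        (PySem.Dict.empty, PySem.Dict.empty)
        = xs.foldl
        (fun (st : PySem.Dict Int Int × PySem.Dict Int Int) cur_num =>
          (st.1.insert cur_num (st.1.getD cur_num 0 + 1),
            PySem.Dict.ofList (PySem.List.sorted2
              (st.1.insert cur_num (st.1.getD cur_num 0 + 1)).items Prod.fst Prod.snd)))
        (PySem.Dict.empty, PySem.Dict.empty) := by
      refine List.foldl_ext _ _ _ ?_
      intro st x _; exact step_collapse st x
    have hfold2 : (xs.foldl
        (fun (st : PySem.Dict Int Int × PySem.Dict Int Int) cur_num =>
          (st.1.insert cur_num (st.1.getD cur_num 0 + 1),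
            PySem.Dict.ofList (PySem.List.sorted2
              (st.1.insert cur_num (st.1.getD cur_num 0 + 1)).items Prod.fst Prod.snd)))
        (PySem.Dict.empty, PySem.Dict.empty)).2
        = PySem.Dict.ofList (PySem.List.sorted2
            (xs.foldl (fun (d : PySem.Dict Int Int) x => d.insert x (d.getD x 0 + 1))
              PySem.Dict.empty).items Prod.fst Prod.snd) :=
      pairfold_snd (fun (d : PySem.Dict Int Int) x => d.insert x (d.getD x 0 + 1))
        (fun fd => PySem.Dict.ofList (PySem.List.sorted2 fd.items Prod.fst Prod.snd))
        xs PySem.Dict.empty PySem.Dict.empty hne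
    rw [sort_freq_list_eq, hfst]
    refine Prod.ext rfl ?_
    show (xs.foldl _ (PySem.Dict.empty, PySem.Dict.empty)).2.items = (pvGroupRuns asc).2
    rw [hfold1, hfold2,
      PySem.Dict.foldl_insert_getD_add_one_eq_counter, hsnd2, hitems,
      hUmap, hmapeq]
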